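-- pv_equiv track=rewrite | github.com/CicadaInc/tetropentada | LSA.py | drawing_up_the_matrix
-- ===== SOURCE A (Python) =====
-- def drawing_up_the_matrix(words, sentences):
--     matrix = []
--     for i in range(len(words)):
--         matrix.append([])
--         for text in sentences:
--             text = text.split()
--             matrix[i].append(text.count(words[i]))
--     return matrix
-- ===== SOURCE B (Python) =====
-- def drawing_up_the_matrix(words, sentences):
--     counters = []
--     for text in sentences:
--         c = {}
--         for w in text.split():
--             c[w] = c.get(w, 0) + 1
--         counters.append(c)
--     return [[c.get(w, 0) for c in counters] for w in words]
-- ===== Notes on version B (the rewrite author's own statement) =====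
-- stated objective: faster
-- what changed: B builds one count dictionary per sentence in a single pass and then answers each (word, sentence) cell by an O(1) dict lookup, instead of A's re-splitting every sentence and rescanning it with list.count for every word.
import Mathlib
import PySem

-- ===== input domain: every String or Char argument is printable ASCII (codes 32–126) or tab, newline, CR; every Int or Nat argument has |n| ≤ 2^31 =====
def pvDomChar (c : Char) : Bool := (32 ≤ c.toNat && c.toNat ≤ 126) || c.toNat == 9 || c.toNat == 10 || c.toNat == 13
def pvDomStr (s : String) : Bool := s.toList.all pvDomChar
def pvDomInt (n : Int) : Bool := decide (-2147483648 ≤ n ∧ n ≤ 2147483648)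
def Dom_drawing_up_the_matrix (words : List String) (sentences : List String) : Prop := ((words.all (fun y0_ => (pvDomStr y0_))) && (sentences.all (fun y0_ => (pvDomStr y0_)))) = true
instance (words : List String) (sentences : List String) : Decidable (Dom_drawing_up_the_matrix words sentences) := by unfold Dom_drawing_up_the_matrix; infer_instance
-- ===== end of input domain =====

-- B replaces A's per-cell rescans (split + list.count for every word×sentence pair)
-- by one count-dictionary per sentence built in a single pass, then O(1) lookups: faster (asymptotic).

-- ===== PORT A =====
def drawing_up_the_matrix (words : List String) (sentences : List String) : List (List Int) :=
  (PySem.List.pyRange 0 words.length 1).foldl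
    (fun matrix i =>
      matrix ++ [sentences.foldl
        (fun row text =>
          row ++ [(PySem.List.count (PySem.Str.split₀ text) (PySem.List.pyGetD words i "") : Int)])
        []])
    []

-- ===== PORT B =====
def drawing_up_the_matrix_alt (words : List String) (sentences : List String) : List (List Int) :=
  let counters : List (PySem.Dict String Int) :=
    sentences.map (fun text =>
      (PySem.Str.split₀ text).foldl (fun c w => c.insert w (c.getD w 0 + 1)) PySem.Dict.empty)
  words.map (fun w => counters.map (fun c => c.getD w 0))

-- ===== PRECONDITION & SPEC =====
def Spec_drawing_up_the_matrix (words : List String) (sentences : List String) (out : List (List Int)) : Prop := out = drawing_up_the_matrix_alt words sentences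
instance (words : List String) (sentences : List String) (out : List (List Int)) : Decidable (Spec_drawing_up_the_matrix words sentences out) := by unfold Spec_drawing_up_the_matrix; infer_instance

-- ===== CLAIM (what is proved, stated in full; the proofs are below) =====
def Claim_equal_drawing_up_the_matrix : Prop := ∀ (words : List String) (sentences : List String), Dom_drawing_up_the_matrix words sentences → Spec_drawing_up_the_matrix words sentences (drawing_up_the_matrix words sentences)

-- ===== LEMMAS AND PROOFS =====

-- Both sides equal the direct nested-map description of the matrix.
theorem drawing_matrix_a_eq (words sentences : List String) :
    drawing_up_the_matrix words sentences
      = words.map (fun w => sentences.map (fun t => (PySem.List.count (PySem.Str.split₀ t) w : Int))) := by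
  unfold drawing_up_the_matrix
  simp only [PySem.List.foldl_append_singleton_eq_map, List.nil_append]
  rw [show (fun i => sentences.map fun t => (PySem.List.count (PySem.Str.split₀ t) (PySem.List.pyGetD words i "") : Int))
        = (fun w => sentences.map fun t => (PySem.List.count (PySem.Str.split₀ t) w : Int)) ∘ (fun i => PySem.List.pyGetD words i "") from rfl,
      ← List.map_map, PySem.List.map_pyGetD_pyRange_zero']

theorem drawing_matrix_b_eq (words sentences : List String) :
    drawing_up_the_matrix_alt words sentences
      = words.map (fun w => sentences.map (fun t => (PySem.List.count (PySem.Str.split₀ t) w : Int))) := by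
  unfold drawing_up_the_matrix_alt
  simp [List.map_map, Function.comp_def, PySem.Dict.getD_foldl_insert_add_one,
        PySem.List.count]

-- ===== VERDICT (by name: the statement is the Claim_ definition above) =====
theorem drawing_up_the_matrix_spec : Claim_equal_drawing_up_the_matrix := by
  intro words sentences _
  unfold Spec_drawing_up_the_matrix
  rw [drawing_matrix_a_eq, drawing_matrix_b_eq]
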